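-- pv_equiv track=rewrite | github.com/adhithyan15/coding-adventures | code/packages/python/arm1-simulator/src/arm1_simulator/__init__.py | _disasm_reg_list
-- ===== SOURCE A (Python) =====
-- def _disasm_reg_list(reg_list: int) -> str:
--     """Format a register list bitmap as a comma-separated string."""
--     parts: list[str] = []
--     for i in range(16):
--         if (reg_list >> i) & 1 == 1:
--             if i == 15:
--                 parts.append("PC")
--             elif i == 14:
--                 parts.append("LR")
--             elif i == 13:
--                 parts.append("SP")
--             else:
--                 parts.append(f"R{i}")
--     return ", ".join(parts)
-- ===== SOURCE B (Python) =====
-- def _disasm_reg_list(reg_list: int) -> str: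
--     """Format a register list bitmap as a comma-separated string."""
--     v = reg_list & 0xFFFF
--     names: list[str] = []
--     while v:
--         rest = v & (v - 1)        # v with its lowest set bit cleared
--         low = v ^ rest            # the lowest set bit itself
--         i = low.bit_length() - 1
--         names.append("PC" if i == 15 else "LR" if i == 14 else "SP" if i == 13 else f"R{i}")
--         v = rest
--     return ", ".join(names)
-- ===== Notes on version B (the rewrite author's own statement) =====
-- stated objective: alternative
-- what changed: Instead of scanning every bit position in order with shift-and-test, B masks the bitmap once and then loops only over its set bits, clearing the lowest set bit (v & (v-1)) and reading its index via bit_length each round.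
import Mathlib
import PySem

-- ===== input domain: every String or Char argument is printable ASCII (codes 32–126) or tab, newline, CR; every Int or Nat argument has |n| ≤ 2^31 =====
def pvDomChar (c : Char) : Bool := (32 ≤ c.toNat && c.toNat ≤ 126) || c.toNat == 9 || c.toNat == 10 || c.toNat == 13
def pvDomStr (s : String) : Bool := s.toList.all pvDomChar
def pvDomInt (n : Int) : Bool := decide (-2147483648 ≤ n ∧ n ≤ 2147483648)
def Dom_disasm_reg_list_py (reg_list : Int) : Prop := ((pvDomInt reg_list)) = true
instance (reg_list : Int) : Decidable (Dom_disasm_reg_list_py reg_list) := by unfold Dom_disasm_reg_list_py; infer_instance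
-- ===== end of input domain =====

-- B replaces A's fixed scan of all 16 bit positions by a loop that visits only the set
-- bits of reg_list & 0xFFFF, clearing the lowest set bit each round (alternative decomposition).

-- ===== PORT A =====
-- literal port of A: for i in range(16): if (reg_list >> i) & 1 == 1: append name; then ", ".join
-- (i from range(16) is nonnegative, so 'reg_list >> i' is exactly 'reg_list >>> i.toNat')
def disasm_reg_list_py (reg_list : Int) : String :=
  PySem.Str.join ", "
    ((PySem.List.pyRange 0 16 1).foldl
      (fun parts i =>
        if PySem.Int.band (reg_list >>> i.toNat) 1 == 1 then
          parts ++ [if i == 15 then "PC" else if i == 14 then "LR" else if i == 13 then "SP"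
                    else "R" ++ PySem.Int.toStr i]
        else parts) [])

-- ===== PORT B =====
-- the while-loop of Source B; fuel = current v.toNat (v decreases strictly each round, so it suffices)
def pvAltLoop : Int → Nat → List String
  | _, 0 => []
  | v, fuel+1 =>
    if v == 0 then []
    else
      let rest := PySem.Int.band v (v - 1)
      let low := PySem.Int.bxor v rest
      let i : Int := (PySem.Int.bitLength low : Int) - 1   -- low.bit_length() - 1
      (if i == 15 then "PC" else if i == 14 then "LR" else if i == 13 then "SP"
       else "R" ++ PySem.Int.toStr i) :: pvAltLoop rest fuel

def disasm_reg_list_py_alt (reg_list : Int) : String :=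
  let v := PySem.Int.band reg_list 65535
  PySem.Str.join ", " (pvAltLoop v v.toNat)

-- ===== PRECONDITION & SPEC =====
def Spec_disasm_reg_list_py (reg_list : Int) (out : String) : Prop := out = disasm_reg_list_py_alt reg_list
instance (reg_list : Int) (out : String) : Decidable (Spec_disasm_reg_list_py reg_list out) := by unfold Spec_disasm_reg_list_py; infer_instance

-- ===== CLAIM (what is proved, stated in full; the proofs are below) =====
def Claim_equal_disasm_reg_list_py : Prop := ∀ (reg_list : Int), Dom_disasm_reg_list_py reg_list → Spec_disasm_reg_list_py reg_list (disasm_reg_list_py reg_list)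

-- ===== LEMMAS AND PROOFS =====

-- register name of bit position t, Nat-indexed (common form both ports reduce to)
def pvName (t : Nat) : String :=
  if t == 15 then "PC" else if t == 14 then "LR" else if t == 13 then "SP"
  else "R" ++ PySem.Int.toStr (t : Int)

-- Nat mirror of pvAltLoop's index trace
def pvIdx : Nat → Nat → List Nat
  | _, 0 => []
  | n, fuel+1 =>
    if n = 0 then []
    else
      (PySem.Int.bitLength ((n ^^^ (n &&& (n - 1)) : Nat) : Int) - 1)
        :: pvIdx (n &&& (n - 1)) fuel

theorem pvName_int (t : Nat) :
    (if ((t : Int) == 15) then "PC" else if ((t : Int) == 14) then "LR"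
     else if ((t : Int) == 13) then "SP" else "R" ++ PySem.Int.toStr (t : Int)) = pvName t := by
  unfold pvName
  simp only [beq_iff_eq]
  split_ifs <;> first | rfl | omega

-- Python's  a & 0xFFFF  is  a mod 2^16
theorem pv_band_mask (a : Int) : PySem.Int.band a 65535 = a % 65536 := by
  have hmask : ∀ m : Nat, m &&& 65535 = m % 65536 := by
    intro m
    have h := Nat.and_two_pow_sub_one_eq_mod m 16
    norm_num at h
    exact h
  rw [PySem.Int.band]
  by_cases h : 0 ≤ a
  · rw [if_pos h, if_pos (by norm_num), show Int.toNat 65535 = 65535 from rfl]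
    rw [hmask a.toNat]
    omega
  · rw [if_neg h, if_pos (by norm_num), show Int.toNat 65535 = 65535 from rfl]
    rw [Nat.land_comm, hmask (-a - 1).toNat]
    omega

theorem pv_testBit_div (n k : Nat) : n.testBit k = decide (n / 2 ^ k % 2 = 1) := by
  induction k generalizing n with
  | zero => simp [Nat.testBit_zero]
  | succ k ih =>
    rw [Nat.testBit_succ, ih, Nat.div_div_eq_div_mul]
    rw [show 2 * 2 ^ k = 2 ^ (k + 1) by rw [Nat.pow_succ]; ring]

-- A's bit test is the k-th bit of (a mod 2^16), for k < 16
theorem pv_bitA (a : Int) (k : Nat) (hk : k < 16) :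
    (PySem.Int.band (a >>> ((k : Nat) : Int)) 1 == 1) = (a % 65536).toNat.testBit k := by
  rw [Int.shiftRight_natCast_right, PySem.Int.band_one, PySem.Int.mod_eq_emod_of_pos (by norm_num), Int.shiftRight_eq_div_pow]
  have hnn : 0 ≤ a % 65536 := Int.emod_nonneg a (by norm_num)
  set n : Nat := (a % 65536).toNat with hn
  have h1 : a % 65536 = (n : Int) := by omega
  have h16 : (2 : Int) ^ (15 - k) * 2 * 2 ^ k = 65536 := by
    rw [← pow_succ, ← pow_add, show 15 - k + 1 + k = 16 by omega]
    norm_num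
  have hq : a = (n : Int) + 2 ^ (15 - k) * (a / 65536) * 2 * 2 ^ k := by
    have e : 65536 * (a / 65536) + (n : Int) = a := by omega
    linear_combination -e - (a / 65536) * h16
  have key : a / ((2 : Int) ^ k) % 2 = (n : Int) / (2 : Int) ^ k % 2 := by
    conv_lhs => rw [hq]
    rw [show (n : Int) + 2 ^ (15 - k) * (a / 65536) * 2 * 2 ^ k
        = (n : Int) + (2 ^ (15 - k) * (a / 65536) * 2) * 2 ^ k by ring]
    rw [Int.add_mul_ediv_right _ _ (by positivity : ((2 : Int) ^ k) ≠ 0)]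
    rw [show (n : Int) / 2 ^ k + 2 ^ (15 - k) * (a / 65536) * 2
        = (n : Int) / 2 ^ k + 2 * (2 ^ (15 - k) * (a / 65536)) by ring]
    rw [Int.add_mul_emod_self_left]
  rw [pv_testBit_div]
  push_cast at key ⊢
  rw [key]
  have hcast : (n : Int) / (2 : Int) ^ k % 2 = ((n / 2 ^ k % 2 : Nat) : Int) := by
    push_cast
    rfl
  rw [hcast]
  by_cases hb : n / 2 ^ k % 2 = 1
  · simp [hb]
  · simp [hb]
    omega

theorem pv_keyOdd1 (m : Nat) : (2 * m + 1) &&& (2 * m + 1 - 1) = 2 * m := by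
  rw [show 2 * m + 1 - 1 = 2 * m by omega]
  apply Nat.eq_of_testBit_eq
  intro i
  cases i with
  | zero =>
    rw [Nat.testBit_land]
    simp [Nat.testBit_zero, Nat.mul_mod_right]
  | succ i =>
    rw [Nat.testBit_land, Nat.testBit_succ, Nat.testBit_succ,
      show (2 * m + 1) / 2 = m by omega, show 2 * m / 2 = m by omega, Bool.and_self]

theorem pv_keyOdd2 (m : Nat) : (2 * m + 1) ^^^ (2 * m) = 1 := by
  apply Nat.eq_of_testBit_eq
  intro i
  cases i with
  | zero =>
    rw [Nat.testBit_xor]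
    simp [Nat.testBit_zero, Nat.mul_mod_right]
  | succ i =>
    rw [Nat.testBit_xor, Nat.testBit_succ, Nat.testBit_succ, Nat.testBit_succ,
      show (2 * m + 1) / 2 = m by omega, show 2 * m / 2 = m by omega, show 1 / 2 = 0 by omega]
    simp [Nat.zero_testBit]

theorem pv_keyEven1 (m : Nat) : (2 * m) &&& (2 * m - 1) = 2 * (m &&& (m - 1)) := by
  apply Nat.eq_of_testBit_eq
  intro i
  cases i with
  | zero =>
    rw [Nat.testBit_land]
    simp [Nat.testBit_zero, Nat.mul_mod_right]
  | succ i =>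
    rw [Nat.testBit_land, Nat.testBit_succ, Nat.testBit_succ, Nat.testBit_succ,
      show 2 * m / 2 = m by omega, show (2 * m - 1) / 2 = m - 1 by omega,
      show 2 * (m &&& (m - 1)) / 2 = m &&& (m - 1) by omega, Nat.testBit_land]

theorem pv_keyEven2 (m : Nat) : (2 * m) ^^^ (2 * (m &&& (m - 1))) = 2 * (m ^^^ (m &&& (m - 1))) := by
  apply Nat.eq_of_testBit_eq
  intro i
  cases i with
  | zero =>
    rw [Nat.testBit_xor]
    simp [Nat.testBit_zero, Nat.mul_mod_right]
  | succ i =>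
    rw [Nat.testBit_xor, Nat.testBit_succ, Nat.testBit_succ, Nat.testBit_succ,
      show 2 * m / 2 = m by omega, show 2 * (m &&& (m - 1)) / 2 = m &&& (m - 1) by omega,
      show 2 * (m ^^^ (m &&& (m - 1))) / 2 = m ^^^ (m &&& (m - 1)) by omega, Nat.testBit_xor]

theorem pv_xor_rest_ne (n : Nat) (hn : n ≠ 0) : n ^^^ (n &&& (n - 1)) ≠ 0 := by
  intro h
  have h1 : n = n &&& (n - 1) := Nat.xor_eq_zero_iff.mp h
  have h2 : n &&& (n - 1) ≤ n - 1 := Nat.and_le_right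
  omega

-- pvAltLoop on a nonnegative value is pvName mapped over the Nat index trace
theorem pv_altLoop_eq (fuel n : Nat) :
    pvAltLoop (n : Int) fuel = (pvIdx n fuel).map pvName := by
  induction fuel generalizing n with
  | zero => rfl
  | succ fuel ih =>
    by_cases hn : n = 0
    · simp [pvAltLoop, pvIdx, hn]
    · have h1 : (n : Int) - 1 = ((n - 1 : Nat) : Int) := by omega
      have hL : n ^^^ (n &&& (n - 1)) ≠ 0 := pv_xor_rest_ne n hn
      have hb : 1 ≤ PySem.Int.bitLength ((n ^^^ (n &&& (n - 1)) : Nat) : Int) := by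
        rw [PySem.Int.bitLength_natCast (by omega)]
        omega
      have h2 : ((PySem.Int.bitLength ((n ^^^ (n &&& (n - 1)) : Nat) : Int) : Int) - 1)
          = ((PySem.Int.bitLength ((n ^^^ (n &&& (n - 1)) : Nat) : Int) - 1 : Nat) : Int) := by
        omega
      simp only [pvAltLoop, pvIdx]
      rw [if_neg (by simpa using hn), if_neg hn]
      rw [h1, PySem.Int.band_natCast, PySem.Int.bxor_natCast]
      rw [List.map_cons, ← ih (n &&& (n - 1))]
      rw [h2, pvName_int]

theorem pv_idx_two_mul (fuel x : Nat) : pvIdx (2 * x) fuel = (pvIdx x fuel).map (· + 1) := by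
  induction fuel generalizing x with
  | zero => rfl
  | succ fuel ih =>
    by_cases hx : x = 0
    · simp [pvIdx, hx]
    · rw [pvIdx, pvIdx, if_neg (by omega), if_neg hx]
      rw [pv_keyEven1 x, pv_keyEven2 x]
      have hL : x ^^^ (x &&& (x - 1)) ≠ 0 := pv_xor_rest_ne x hx
      have hb2 : PySem.Int.bitLength ((2 * (x ^^^ (x &&& (x - 1))) : Nat) : Int)
          = PySem.Int.bitLength ((x ^^^ (x &&& (x - 1)) : Nat) : Int) + 1 := by
        rw [PySem.Int.bitLength_natCast (by omega)]
        rw [show 2 * (x ^^^ (x &&& (x - 1))) / 2 = x ^^^ (x &&& (x - 1)) by omega]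
      have hb1 : 1 ≤ PySem.Int.bitLength ((x ^^^ (x &&& (x - 1)) : Nat) : Int) := by
        rw [PySem.Int.bitLength_natCast (by omega)]
        omega
      rw [List.map_cons, hb2, ih (x &&& (x - 1))]
      congr 1
      omega

theorem pv_idx_eq_bitIndices (n : Nat) : ∀ fuel, n ≤ fuel → pvIdx n fuel = n.bitIndices := by
  induction n using Nat.strong_induction_on with
  | _ n IH =>
    intro fuel hfuel
    rcases Nat.even_or_odd n with he | ho
    · obtain ⟨x, hx⟩ := he
      by_cases hx0 : x = 0
      · subst hx
        subst hx0
        cases fuel <;> simp [pvIdx, Nat.bitIndices_zero]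
      · have hxn : x < n := by omega
        have h2x : n = 2 * x := by omega
        rw [h2x, pv_idx_two_mul, IH x hxn fuel (by omega), Nat.bitIndices_two_mul]
    · obtain ⟨x, hx⟩ := ho
      subst hx
      cases fuel with
      | zero => omega
      | succ fuel =>
        rw [pvIdx, if_neg (by omega)]
        rw [pv_keyOdd1 x, pv_keyOdd2 x]
        rw [show PySem.Int.bitLength ((1 : Nat) : Int) - 1 = 0 by decide]
        rw [pv_idx_two_mul, IH x (by omega) fuel (by omega)]
        rw [Nat.bitIndices_two_mul_add_one]

theorem pv_mem_bitIndices (n k : Nat) : k ∈ n.bitIndices ↔ n.testBit k = true := by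
  induction n using Nat.strong_induction_on generalizing k with
  | _ n IH =>
    rcases Nat.even_or_odd n with he | ho
    · obtain ⟨x, hx⟩ := he
      by_cases hx0 : x = 0
      · subst hx; subst hx0
        simp [Nat.bitIndices_zero, Nat.zero_testBit]
      · have h2x : n = 2 * x := by omega
        subst h2x
        rw [Nat.bitIndices_two_mul]
        cases k with
        | zero =>
          simp [Nat.testBit_zero, Nat.mul_mod_right]
        | succ k =>
          rw [Nat.testBit_succ, show 2 * x / 2 = x by omega, ← IH x (by omega) k]
          simp
    · obtain ⟨x, hx⟩ := ho
      subst hx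
      rw [Nat.bitIndices_two_mul_add_one]
      cases k with
      | zero =>
        simp [Nat.testBit_zero]
      | succ k =>
        rw [Nat.testBit_succ, show (2 * x + 1) / 2 = x by omega, ← IH x (by omega) k]
        simp

theorem pv_filter_range_eq_bitIndices (n : Nat) (hn : n < 65536) :
    (List.range 16).filter n.testBit = n.bitIndices := by
  have hnd1 : ((List.range 16).filter n.testBit).Nodup := (List.nodup_range).filter _
  have hnd2 : n.bitIndices.Nodup := Nat.bitIndices_nodup
  have hmem : ∀ a, a ∈ (List.range 16).filter n.testBit ↔ a ∈ n.bitIndices := by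
    intro a
    rw [List.mem_filter, List.mem_range, pv_mem_bitIndices]
    constructor
    · exact fun h => h.2
    · intro h
      refine ⟨?_, h⟩
      by_contra hge
      have : n < 2 ^ a := lt_of_lt_of_le hn (by
        calc (65536 : Nat) = 2 ^ 16 := by norm_num
        _ ≤ 2 ^ a := Nat.pow_le_pow_right (by omega) (by omega))
      rw [Nat.testBit_lt_two_pow this] at h
      exact absurd h (by simp)
  have hperm : ((List.range 16).filter n.testBit).Perm n.bitIndices :=
    (List.perm_ext_iff_of_nodup hnd1 hnd2).mpr hmem
  refine List.Perm.eq_of_pairwise (le := (· < ·)) (fun a b _ _ h1 h2 => by omega) ?_ ?_ hperm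
  · exact List.Pairwise.filter _ (List.pairwise_lt_range)
  · exact List.sortedLT_iff_pairwise.mp Nat.bitIndices_sorted

-- ===== VERDICT (by name: the statement is the Claim_ definition above) =====
theorem disasm_reg_list_py_spec : Claim_equal_disasm_reg_list_py := by
  intro a _
  unfold Spec_disasm_reg_list_py disasm_reg_list_py disasm_reg_list_py_alt
  have hnn : 0 ≤ a % 65536 := Int.emod_nonneg a (by norm_num)
  set n : Nat := (a % 65536).toNat with hn
  have hn16 : n < 65536 := by omega
  -- B side
  rw [pv_band_mask, show a % 65536 = (n : Int) by omega]
  show _ = PySem.Str.join ", " (pvAltLoop (n : Int) ((n : Int)).toNat)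
  rw [show ((n : Int)).toNat = n from Int.toNat_natCast n]
  rw [pv_altLoop_eq n n, pv_idx_eq_bitIndices n n le_rfl, ← pv_filter_range_eq_bitIndices n hn16]
  -- A side
  rw [PySem.List.foldl_append_if
    (p := fun i : Int => PySem.Int.band (a >>> (i.toNat : Int)) 1 == 1)
    (f := fun i : Int =>
      if i == 15 then "PC" else if i == 14 then "LR" else if i == 13 then "SP"
      else "R" ++ PySem.Int.toStr i)]
  rw [List.nil_append, PySem.List.pyRange_one]
  rw [show ((16 : Int) - 0).toNat = 16 by decide]
  rw [List.filter_map, List.map_map]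
  congr 1
  have hfil : (List.range 16).filter
      ((fun i : Int => PySem.Int.band (a >>> (i.toNat : Int)) 1 == 1) ∘ fun k : Nat => (0 : Int) + k)
      = (List.range 16).filter n.testBit := by
    apply List.filter_congr
    intro k hk
    rw [List.mem_range] at hk
    show (PySem.Int.band (a >>> ((((0 : Int) + (k : Int)).toNat : Nat) : Int)) 1 == 1) = n.testBit k
    rw [show ((0 : Int) + (k : Int)).toNat = k by omega]
    rw [pv_bitA a k hk]
  rw [hfil]
  apply List.map_congr_left
  intro k hk
  rw [List.mem_filter, List.mem_range] at hk
  show (if ((0 : Int) + (k : Int)) == 15 then "PC" else if ((0 : Int) + (k : Int)) == 14 then "LR"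
    else if ((0 : Int) + (k : Int)) == 13 then "SP" else "R" ++ PySem.Int.toStr ((0 : Int) + (k : Int)))
    = pvName k
  rw [show ((0 : Int) + (k : Int)) = (k : Int) by ring]
  exact pvName_int k
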